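-- pv_equiv track=rewrite | github.com/Preetiraj3697/leetcode | src/2591-frog-jump-ii/frog-jump-ii.py | maxJump
-- ===== SOURCE A (Python) =====
-- from typing import List
--
-- def maxJump(stones: List[int]) -> int:
--     l, r = 0, 0
--     n = len(stones)
--     res = 0
--
--     s = [1] * n
--     s[0] = 0
--
--     while l < n - 1 and r < n - 1:
--         if l > r:
--             l, r = r, l
--         idx = l
--         while not s[l]: l += 1
--         res = max(res, abs(stones[idx] - stones[l]))
--         s[l] = 0
--
--     if l == n:
--         l = r
--     s[-1] = 1
--     while l < n - 1:
--         idx = l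
--         while not s[l]: l += 1
--         res = max(res, abs(stones[idx] - stones[l]))
--         s[l] = 0
--     return res
-- ===== SOURCE B (Python) =====
-- def maxJump(stones):
--     n = len(stones)
--     if n == 1:
--         return 0
--     res = abs(stones[1] - stones[0])
--     for i in range(2, n):
--         res = max(res, abs(stones[i] - stones[i - 2]))
--     return res
-- ===== Notes on version B (the rewrite author's own statement) =====
-- stated objective: simpler
-- what changed: Replaces A's visited-marker-array two-pointer simulation (three while loops mutating a marker list) with a direct single pass: the split is always even/odd indices, so B takes the absolute gap of the first two stones and folds max over the absolute gaps between each stone and the one two places before it.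
import Mathlib
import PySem

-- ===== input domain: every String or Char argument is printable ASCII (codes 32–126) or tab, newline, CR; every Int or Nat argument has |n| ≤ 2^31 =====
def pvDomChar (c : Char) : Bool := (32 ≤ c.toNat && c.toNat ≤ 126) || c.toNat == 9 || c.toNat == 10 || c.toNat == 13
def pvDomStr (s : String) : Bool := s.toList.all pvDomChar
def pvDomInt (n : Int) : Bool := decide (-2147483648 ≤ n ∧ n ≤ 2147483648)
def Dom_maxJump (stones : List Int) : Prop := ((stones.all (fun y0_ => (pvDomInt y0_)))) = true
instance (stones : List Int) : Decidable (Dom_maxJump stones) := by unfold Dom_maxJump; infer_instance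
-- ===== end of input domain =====

-- B replaces A's visited-array two-pointer simulation by a direct single pass (simpler, same O(n) cost).

-- ===== PORT A =====
-- 'while not s[l]: l += 1'  (none = IndexError or fuel exhaustion; fuel s.length+1 always suffices)
def pvInner (s : List Int) : Nat → Int → Option Int
  | 0, _ => none
  | fuel + 1, l =>
    match PySem.List.pyGet? s l with
    | none => none
    | some v => if v = 0 then pvInner s fuel (l + 1) else some l

-- first 'while l < n-1 and r < n-1' loop; state (l, r, s, res)
def pvLoop1 (stones : List Int) (n : Int) : Nat → Int → Int → List Int → Int → Option (Int × Int × List Int × Int)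
  | 0, _, _, _, _ => none
  | fuel + 1, l, r, s, res =>
    if l < n - 1 ∧ r < n - 1 then
      let l' := if l > r then r else l
      let r' := if l > r then l else r
      let idx := l'
      match pvInner s (s.length + 1) l' with
      | none => none
      | some l2 =>
        match PySem.List.pyGet? stones idx, PySem.List.pyGet? stones l2 with
        | some a, some b =>
          match PySem.List.pySet? s l2 0 with
          | some s' => pvLoop1 stones n fuel l2 r' s' (max res |a - b|)
          | none => none
        | _, _ => none
    else some (l, r, s, res)

-- second 'while l < n-1' loop; returns res
def pvLoop2 (stones : List Int) (n : Int) : Nat → Int → List Int → Int → Option Int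
  | 0, _, _, _ => none
  | fuel + 1, l, s, res =>
    if l < n - 1 then
      let idx := l
      match pvInner s (s.length + 1) l with
      | none => none
      | some l2 =>
        match PySem.List.pyGet? stones idx, PySem.List.pyGet? stones l2 with
        | some a, some b =>
          match PySem.List.pySet? s l2 0 with
          | some s' => pvLoop2 stones n fuel l2 s' (max res |a - b|)
          | none => none
        | _, _ => none
    else some res

-- transliteration of A; none (a Python exception: s[0]=0 on the empty list) only outside Pre_, mapped to 0
def pvRunA (stones : List Int) : Option Int :=
  let n : Int := stones.length
  match PySem.List.pySet? (List.replicate stones.length (1 : Int)) 0 0 with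
  | none => none
  | some s =>
    match pvLoop1 stones n (stones.length + 1) 0 0 s 0 with
    | none => none
    | some (l, r, s, res) =>
      let l := if l = n then r else l
      match PySem.List.pySet? s (-1) 1 with
      | none => none
      | some s => pvLoop2 stones n (stones.length + 1) l s res

def maxJump (stones : List Int) : Int := (pvRunA stones).getD 0

-- ===== PORT B =====
def maxJump_alt (stones : List Int) : Int :=
  let n : Int := stones.length
  if n = 1 then 0
  else
    (PySem.List.pyRange 2 n 1).foldl
      (fun res i => max res |PySem.List.pyGetD stones i 0 - PySem.List.pyGetD stones (i - 2) 0|)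
      |PySem.List.pyGetD stones 1 0 - PySem.List.pyGetD stones 0 0|

-- ===== PRECONDITION & SPEC =====
-- A raises IndexError on the empty list (s[0] = 0 on an empty marker list); B raises there too (stones[1]).
def Pre_maxJump (stones : List Int) : Prop := stones ≠ []
instance (stones : List Int) : Decidable (Pre_maxJump stones) := by unfold Pre_maxJump; infer_instance
def pvWitness_maxJump : List Int := ([3, 7, 2, 11])

def Spec_maxJump (stones : List Int) (out : Int) : Prop := out = maxJump_alt stones
instance (stones : List Int) (out : Int) : Decidable (Spec_maxJump stones out) := by unfold Spec_maxJump; infer_instance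

-- ===== CLAIM (what is proved, stated in full; the proofs are below) =====
def Claim_equal_maxJump : Prop := ∀ (stones : List Int), Dom_maxJump stones → Pre_maxJump stones → Spec_maxJump stones (maxJump stones)

-- ===== LEMMAS AND PROOFS =====

-- the marker list after k+1 indices have been visited: a zeros then b ones
def pvZos (a b : Nat) : List Int := List.replicate a 0 ++ List.replicate b 1

theorem pvZos_get_lt {a b l : Nat} (h : l < a) :
    PySem.List.pyGet? (pvZos a b) (l : Int) = some 0 := by
  simp [pvZos, PySem.List.pyGet?_natCast, List.getElem?_append, h]

theorem pvZos_get_eq {a b : Nat} (hb : 0 < b) :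
    PySem.List.pyGet? (pvZos a b) (a : Int) = some 1 := by
  simp [pvZos, PySem.List.pyGet?_natCast]
  rw [List.getElem?_append_right (by simp)]
  simp [hb]

theorem pvInner_run (a b : Nat) (hb : 0 < b) :
    ∀ (fuel l : Nat), l ≤ a → a - l < fuel →
      pvInner (pvZos a b) fuel (l : Int) = some (a : Int) := by
  intro fuel
  induction fuel with
  | zero => intro l _ h; omega
  | succ f ih =>
    intro l hla hfuel
    by_cases h : l < a
    · rw [pvInner, pvZos_get_lt h]
      have : ((l : Int) + 1) = ((l + 1 : Nat) : Int) := by push_cast; ring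
      simp only [this]
      exact ih (l + 1) (by omega) (by omega)
    · have : l = a := by omega
      subst this
      rw [pvInner, pvZos_get_eq hb]
      simp

theorem pvZos_set (a b : Nat) (hb : 0 < b) :
    PySem.List.pySet? (pvZos a b) (a : Int) 0 = some (pvZos (a + 1) (b - 1)) := by
  rcases b with _ | b'
  · omega
  · rw [PySem.List.pySet?_natCast _ _ _ (by simp [pvZos])]
    unfold pvZos
    rw [List.replicate_succ, List.set_append_right _ _ (by simp)]
    simp [List.replicate_succ' (n := a)]

-- the fold B performs from index i = k+1 upward
def pvF (stones : List Int) (k : Nat) (res : Int) : Int :=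
  (PySem.List.pyRange ((k : Int) + 1) (stones.length : Int) 1).foldl
    (fun res i => max res |PySem.List.pyGetD stones i 0 - PySem.List.pyGetD stones (i - 2) 0|) res

theorem pvLoop1_run (stones : List Int) :
    ∀ (m k fuel : Nat) (res : Int), 1 ≤ k → k + 1 + m = stones.length → m < fuel →
      pvLoop1 stones (stones.length : Int) fuel (k : Int) ((k : Int) - 1)
        (pvZos (k + 1) (stones.length - (k + 1))) res =
      some ((stones.length : Int) - 1, (stones.length : Int) - 2, pvZos stones.length 0, pvF stones k res) := by
  intro m
  induction m with
  | zero =>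
    intro k fuel res hk hn hf
    rcases fuel with _ | f
    · omega
    rw [pvLoop1, if_neg (by omega)]
    have hk' : (k : Int) = (stones.length : Int) - 1 := by omega
    have hz : stones.length - (k + 1) = 0 := by omega
    have hkk : k + 1 = stones.length := by omega
    rw [hk', hz, hkk]
    have : pvF stones k res = res := by
      unfold pvF
      rw [PySem.List.pyRange_one_eq_nil (by omega)]
      rfl
    rw [this]
    simp only [Option.some.injEq, Prod.mk.injEq, true_and, and_true]
    omega
  | succ m ih =>
    intro k fuel res hk hn hf
    rcases fuel with _ | f
    · omega
    rw [pvLoop1, if_pos (by constructor <;> omega)]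
    simp only [show ((k : Int) > (k : Int) - 1) = True by simp, if_true]
    have hcast : (k : Int) - 1 = ((k - 1 : Nat) : Int) := by omega
    rw [hcast]
    have hb : 0 < stones.length - (k + 1) := by omega
    rw [pvInner_run (k + 1) (stones.length - (k + 1)) hb _ (k - 1) (by omega)
        (by simp [pvZos]; omega)]
    have h1 : k - 1 < stones.length := by omega
    have h2 : k + 1 < stones.length := by omega
    rw [PySem.List.pyGet?_natCast stones (k - 1)]
    simp only []
    rw [PySem.List.pyGet?_natCast stones (k + 1)]
    rw [List.getElem?_eq_getElem h1, List.getElem?_eq_getElem h2]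
    simp only []
    rw [pvZos_set (k + 1) _ hb]
    simp only []
    have hstep : pvLoop1 stones (stones.length : Int) f ((k + 1 : Nat) : Int) (k : Int)
        (pvZos (k + 1 + 1) (stones.length - (k + 1) - 1))
        (max res |stones[k - 1] - stones[k + 1]|) =
        some ((stones.length : Int) - 1, (stones.length : Int) - 2, pvZos stones.length 0,
          pvF stones (k + 1) (max res |stones[k - 1] - stones[k + 1]|)) := by
      have := ih (k + 1) f (max res |stones[k - 1] - stones[k + 1]|) (by omega) (by omega) (by omega)
      rw [show ((k + 1 : Nat) : Int) - 1 = (k : Int) by omega] at this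
      rw [show stones.length - (k + 1 + 1) = stones.length - (k + 1) - 1 by omega] at this
      exact this
    rw [hstep]
    have hfold : pvF stones k res = pvF stones (k + 1) (max res |stones[k - 1] - stones[k + 1]|) := by
      unfold pvF
      rw [show ((k : Int) + 1) = ((k + 1 : Nat) : Int) by push_cast; ring]
      rw [PySem.List.pyRange_one_cons (by omega), List.foldl_cons]
      rw [show ((k + 1 : Nat) : Int) - 2 = ((k - 1 : Nat) : Int) by omega]
      rw [PySem.List.pyGetD_eq_getElem stones (i := ((k + 1 : Nat) : Int)) 0 (by omega) (by omega)]
      rw [PySem.List.pyGetD_eq_getElem stones (i := ((k - 1 : Nat) : Int)) 0 (by omega) (by omega)]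
      rw [abs_sub_comm]
      simp
    rw [hfold]

theorem pvMain_cons2 (x y : Int) (t : List Int) :
    maxJump (x :: y :: t) = maxJump_alt (x :: y :: t) := by
  have hlen : (x :: y :: t).length = t.length + 2 := by simp
  unfold maxJump pvRunA
  have h0 : PySem.List.pySet? (List.replicate (x :: y :: t).length (1 : Int)) 0 0 =
      some (pvZos 1 ((x :: y :: t).length - 1)) := by
    have := PySem.List.pySet?_natCast (List.replicate (x :: y :: t).length (1 : Int)) 0 0
      (by simp [hlen])
    simp only [Nat.cast_zero] at this
    rw [this, hlen]
    simp [List.replicate_succ, pvZos]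
  have hi : pvInner (pvZos 1 ((x :: y :: t).length - 1))
      ((pvZos 1 ((x :: y :: t).length - 1)).length + 1) 0 = some 1 := by
    have := pvInner_run 1 ((x :: y :: t).length - 1) (by omega)
      ((pvZos 1 ((x :: y :: t).length - 1)).length + 1) 0 (by omega) (by simp [pvZos])
    simpa using this
  have hget1 : PySem.List.pyGet? (x :: y :: t) 1 = some y := by
    have h1 : (1 : Int) = ((1 : Nat) : Int) := by simp
    rw [h1, PySem.List.pyGet?_natCast]
    rfl
  have hset1 : PySem.List.pySet? (pvZos 1 ((x :: y :: t).length - 1)) 1 0 =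
      some (pvZos 2 ((x :: y :: t).length - 2)) := by
    have := pvZos_set 1 ((x :: y :: t).length - 1) (by omega)
    simpa [show (x :: y :: t).length - 1 - 1 = (x :: y :: t).length - 2 by omega] using this
  rw [h0]
  simp only []
  rw [pvLoop1, if_pos (by constructor <;> omega)]
  simp only [gt_iff_lt, lt_self_iff_false, reduceIte, hi, PySem.List.pyGet?_zero_cons, hget1,
    hset1]
  have hrun := pvLoop1_run (x :: y :: t) ((x :: y :: t).length - 2) 1 ((x :: y :: t).length)
    (max 0 |x - y|) (le_refl 1) (by omega) (by omega)
  simp only [Nat.cast_one, Nat.reduceAdd] at hrun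
  rw [show (1 : Int) - 1 = 0 by norm_num] at hrun
  rw [hrun]
  simp only []
  rw [if_neg (by omega)]
  obtain ⟨s', hs'⟩ : ∃ s', PySem.List.pySet? (pvZos (x :: y :: t).length 0) (-1) 1 = some s' := by
    cases h : PySem.List.pySet? (pvZos (x :: y :: t).length 0) (-1) 1 with
    | none =>
      rw [PySem.List.pySet?_eq_none_iff] at h
      exact absurd ⟨by simp [pvZos], by simp [pvZos]; omega⟩ h
    | some s' => exact ⟨s', rfl⟩
  rw [hs']
  simp only []
  rw [pvLoop2, if_neg (by omega)]
  -- right-hand side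
  unfold maxJump_alt pvF
  rw [if_neg (by omega)]
  simp only [Option.getD_some]
  congr 1
  rw [PySem.List.pyGetD_zero_cons]
  rw [show PySem.List.pyGetD (x :: y :: t) 1 0 = y from by
    rw [PySem.List.pyGetD_eq_getElem (x :: y :: t) (i := 1) 0 (by omega) (by simp)]; rfl]
  rw [abs_sub_comm]
  exact max_eq_right (abs_nonneg _)

theorem maxJump_spec : Claim_equal_maxJump := by
  intro stones _ hpre
  unfold Spec_maxJump
  match stones with
  | [] => exact absurd rfl hpre
  | [x] => rfl
  | x :: y :: t => exact pvMain_cons2 x y t
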